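-- pv_equiv track=rewrite | github.com/pasterApp/Randdi-trading | src/diff.py | risk_score_from_flags
-- ===== SOURCE A (Python) =====
-- from typing import Any, Dict, List
--
-- def risk_score_from_flags(risk_flags: List[Dict[str, str]]) -> int:
--     score = 0
--     for rf in risk_flags:
--         if rf["level"] == "ERROR":
--             score += 100
--         elif rf["level"] == "WARN":
--             score += 10
--     return score
-- ===== SOURCE B (Python) =====
-- from typing import Any, Dict, List
--
-- _WEIGHTS = {"ERROR": 100, "WARN": 10}
--
-- def risk_score_from_flags(risk_flags: List[Dict[str, str]]) -> int:
--     # Divide-and-conquer summation over index ranges; per-element score comes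
--     # from a weight table instead of branching.
--     def go(lo: int, hi: int) -> int:
--         if hi - lo == 0:
--             return 0
--         if hi - lo == 1:
--             return _WEIGHTS.get(risk_flags[lo]["level"], 0)
--         mid = (lo + hi) // 2
--         return go(lo, mid) + go(mid, hi)
--     return go(0, len(risk_flags))
-- ===== Notes on version B (the rewrite author's own statement) =====
-- stated objective: alternative
-- what changed: Replaces the linear branch-and-accumulate loop by a divide-and-conquer summation over index ranges, with each element's contribution read from a weight table (_WEIGHTS.get) instead of an if/elif chain.
import Mathlib
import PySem

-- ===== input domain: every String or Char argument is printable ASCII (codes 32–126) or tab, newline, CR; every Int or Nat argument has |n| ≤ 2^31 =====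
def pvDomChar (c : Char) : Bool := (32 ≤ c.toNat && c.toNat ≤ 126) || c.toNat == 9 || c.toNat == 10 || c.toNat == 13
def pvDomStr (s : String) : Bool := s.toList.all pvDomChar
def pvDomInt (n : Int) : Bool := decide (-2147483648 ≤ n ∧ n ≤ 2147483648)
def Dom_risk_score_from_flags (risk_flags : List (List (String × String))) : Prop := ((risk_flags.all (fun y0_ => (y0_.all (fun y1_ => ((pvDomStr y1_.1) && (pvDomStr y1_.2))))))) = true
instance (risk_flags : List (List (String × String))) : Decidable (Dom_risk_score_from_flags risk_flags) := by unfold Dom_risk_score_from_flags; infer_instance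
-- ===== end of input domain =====

-- B replaces A's branch-and-accumulate loop by a divide-and-conquer summation over index
-- ranges, each element's contribution read from a weight table (alternative decomposition).

-- ===== PORT A =====
-- rf["level"] raises KeyError when the key is missing; Pre_ below excludes that, so getD "" is exact on Pre_.
def risk_score_from_flags (risk_flags : List (List (String × String))) : Int :=
  risk_flags.foldl (fun score rf =>
    if ((rf.lookup "level").getD "") = "ERROR" then score + 100
    else if ((rf.lookup "level").getD "") = "WARN" then score + 10
    else score) 0

-- ===== PORT B =====
-- _WEIGHTS.get(level, 0)
def pvWeight (rf : List (String × String)) : Int :=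
  (([("ERROR", (100 : Int)), ("WARN", 10)].lookup ((rf.lookup "level").getD "")).getD 0)

-- go(lo, hi): divide-and-conquer over the index range [lo, hi); risk_flags[lo] is in range
-- whenever 0 ≤ lo < len, where getD lo [] is exact. The fuel parameter (hi - lo suffices)
-- only makes the same recursion structural; it never alters the computation.
def pvGo (xs : List (List (String × String))) (fuel lo hi : Nat) : Int :=
  match fuel with
  | 0 => 0
  | fuel + 1 =>
    if hi - lo = 0 then 0
    else if hi - lo = 1 then pvWeight (xs.getD lo [])
    else
      let mid := (lo + hi) / 2
      pvGo xs fuel lo mid + pvGo xs fuel mid hi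

def risk_score_from_flags_alt (risk_flags : List (List (String × String))) : Int :=
  pvGo risk_flags risk_flags.length 0 risk_flags.length

-- ===== PRECONDITION & SPEC =====
-- Pre_ excludes exactly the inputs where some dict lacks the "level" key: there Python A (and B) raise KeyError.
def Pre_risk_score_from_flags (risk_flags : List (List (String × String))) : Prop :=
  (risk_flags.all (fun rf => (rf.lookup "level").isSome)) = true
instance (risk_flags : List (List (String × String))) : Decidable (Pre_risk_score_from_flags risk_flags) := by unfold Pre_risk_score_from_flags; infer_instance
def pvWitness_risk_score_from_flags : (List (List (String × String))) :=
  [[("level", "ERROR")], [("level", "WARN"), ("msg", "x")], [("level", "INFO")]]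
def Spec_risk_score_from_flags (risk_flags : List (List (String × String))) (out : Int) : Prop := out = risk_score_from_flags_alt risk_flags
instance (risk_flags : List (List (String × String))) (out : Int) : Decidable (Spec_risk_score_from_flags risk_flags out) := by unfold Spec_risk_score_from_flags; infer_instance

-- ===== CLAIM (what is proved, stated in full; the proofs are below) =====
def Claim_equal_risk_score_from_flags : Prop := ∀ (risk_flags : List (List (String × String))), Dom_risk_score_from_flags risk_flags → Pre_risk_score_from_flags risk_flags → Spec_risk_score_from_flags risk_flags (risk_score_from_flags risk_flags)

-- ===== LEMMAS AND PROOFS =====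
lemma pvGo_eq_sum (xs : List (List (String × String))) :
    ∀ fuel lo hi, hi - lo ≤ fuel →
      pvGo xs fuel lo hi = ((List.range' lo (hi - lo)).map (fun i => pvWeight (xs.getD i []))).sum := by
  intro fuel
  induction fuel with
  | zero =>
    intro lo hi h
    have : hi - lo = 0 := by omega
    simp [pvGo, this]
  | succ fuel ih =>
    intro lo hi h
    rw [pvGo]
    by_cases h0 : hi - lo = 0
    · simp [h0]
    · by_cases h1 : hi - lo = 1
      · simp [h1]
      · have hmid1 : (lo + hi) / 2 - lo ≤ fuel := by omega
        have hmid2 : hi - (lo + hi) / 2 ≤ fuel := by omega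
        simp only [h0, h1, if_false]
        rw [ih lo _ hmid1, ih _ hi hmid2]
        rw [← List.sum_append, ← List.map_append]
        have : List.range' lo ((lo + hi) / 2 - lo) ++ List.range' ((lo + hi) / 2) (hi - (lo + hi) / 2)
            = List.range' lo (hi - lo) := by
          have := @List.range'_append lo ((lo + hi) / 2 - lo) (hi - (lo + hi) / 2) 1
          simp only [one_mul] at this
          rw [show lo + ((lo + hi) / 2 - lo) = (lo + hi) / 2 by omega] at this
          rw [this]; congr 1; omega
        rw [this]

lemma range'_getD_eq (xs : List (List (String × String))) :
    (List.range' 0 xs.length).map (fun i => xs.getD i []) = xs := by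
  rw [List.range'_eq_map_range]
  simp only [Nat.zero_add, List.map_id_fun', id]
  apply List.ext_getElem
  · simp
  · intro i h1 h2
    simp at h1
    simp [List.getD_eq_getElem?_getD, h1]

lemma foldl_score_eq (rs : List (List (String × String))) (s : Int) :
    rs.foldl (fun score rf =>
      if ((rf.lookup "level").getD "") = "ERROR" then score + 100
      else if ((rf.lookup "level").getD "") = "WARN" then score + 10
      else score) s
    = s + (rs.map pvWeight).sum := by
  induction rs generalizing s with
  | nil => simp
  | cons rf rs ih =>
    simp only [List.foldl_cons, List.map_cons, List.sum_cons, ih]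
    have hw : pvWeight rf =
        (if ((rf.lookup "level").getD "") = "ERROR" then (100 : Int)
         else if ((rf.lookup "level").getD "") = "WARN" then 10 else 0) := by
      unfold pvWeight
      by_cases h1 : ((rf.lookup "level").getD "") = "ERROR"
      · simp [h1, List.lookup]
      · by_cases h2 : ((rf.lookup "level").getD "") = "WARN"
        · simp [h2, List.lookup]
        · simp only [List.lookup]
          rw [show ((rf.lookup "level").getD "" == "ERROR") = false from beq_eq_false_iff_ne.mpr h1,
                show ((rf.lookup "level").getD "" == "WARN") = false from beq_eq_false_iff_ne.mpr h2]
          simp [h1, h2]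
    rw [hw]
    split_ifs <;> ring

-- ===== VERDICT (by name: the statement is the Claim_ definition above) =====
theorem risk_score_from_flags_spec : Claim_equal_risk_score_from_flags := by
  intro rs _ _
  unfold Spec_risk_score_from_flags risk_score_from_flags risk_score_from_flags_alt
  rw [foldl_score_eq, pvGo_eq_sum rs rs.length 0 rs.length (by omega)]
  simp only [Nat.sub_zero]
  rw [show (fun i => pvWeight (rs.getD i [])) = pvWeight ∘ (fun i => rs.getD i []) from rfl]
  rw [← List.map_map, range'_getD_eq]
  ring
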